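-- pv_equiv track=rewrite | github.com/kupl/Graphick | Heap_Abstracton/heap_merge_strategies.py | strategy_type
-- ===== SOURCE A (Python) =====
-- def strategy_type(obj_type_map):
--   print ('Strategy: type')
--   type_objset_map = {}
--   for item in obj_type_map.keys():
--       typ = obj_type_map[item]
--       if typ in type_objset_map:
--           type_objset_map[typ].append(item)
--       else:
--           type_objset_map[typ] = [item]
--   print ('Total types: {}'.format(len(type_objset_map.keys())))
--
--   rst = {}
--   for obj in obj_type_map.keys():
--     rst[obj] = type_objset_map[obj_type_map[obj]][0]
--   return rst
-- ===== SOURCE B (Python) =====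
-- def strategy_type(obj_type_map):
--     print('Strategy: type')
--     first_rep = {}
--     rst = {}
--     for item, typ in obj_type_map.items():
--         rst[item] = first_rep.setdefault(typ, item)
--     print('Total types: {}'.format(len(first_rep)))
--     return rst
-- ===== Notes on version B (the rewrite author's own statement) =====
-- stated objective: simpler
-- what changed: Replaces A's two passes (build a type->list-of-objects table, then a second scan reading element [0] of each list) by a single pass that keeps only the first representative per type via setdefault and fills rst in the same loop.
import Mathlib
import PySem

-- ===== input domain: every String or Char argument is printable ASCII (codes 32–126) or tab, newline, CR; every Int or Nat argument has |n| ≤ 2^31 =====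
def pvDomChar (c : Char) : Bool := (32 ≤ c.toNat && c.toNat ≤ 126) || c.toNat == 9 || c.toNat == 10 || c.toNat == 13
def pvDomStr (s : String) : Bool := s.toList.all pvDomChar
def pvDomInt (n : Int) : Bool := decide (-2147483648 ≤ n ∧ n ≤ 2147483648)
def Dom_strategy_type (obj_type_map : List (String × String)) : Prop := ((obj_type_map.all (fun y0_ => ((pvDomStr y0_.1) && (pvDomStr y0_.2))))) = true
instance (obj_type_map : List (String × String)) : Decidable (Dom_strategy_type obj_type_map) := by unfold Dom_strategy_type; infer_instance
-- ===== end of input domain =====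

-- B replaces A's two passes (group objects by type into lists, then look up element [0] per object)
-- by a single pass keeping only the first representative per type; objective: simpler, same return value.
-- Equivalence is about the RETURN value; both Pythons also print the same two lines.

-- ===== PORT A =====
-- for item in obj_type_map.keys(): typ = obj_type_map[item]  — iterating a dict's keys and looking
-- each key up is, under the assoc-list convention, iterating the (item, typ) pairs.
def strategy_type (obj_type_map : List (String × String)) : List (String × String) :=
  let type_objset_map : PySem.Dict String (List String) :=
    obj_type_map.foldl
      (fun d p =>
        if d.contains p.2 then d.modify p.2 [] (· ++ [p.1])   -- type_objset_map[typ].append(item)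
        else d.insert p.2 [p.1])                               -- type_objset_map[typ] = [item]
      PySem.Dict.empty
  let rst : PySem.Dict String String :=
    obj_type_map.foldl
      -- type_objset_map[obj_type_map[obj]][0]: the key is always present and its list nonempty,
      -- so getD/headD defaults are unreachable (Python raises on neither)
      (fun r p => r.insert p.1 ((type_objset_map.getD p.2 []).headD ""))
      PySem.Dict.empty
  rst.items

-- ===== PORT B =====
def strategy_type_alt (obj_type_map : List (String × String)) : List (String × String) :=
  let st :=
    obj_type_map.foldl
      (fun (st : PySem.Dict String String × PySem.Dict String String) p =>
        let first_rep := st.1.setdefault p.2 p.1               -- first_rep.setdefault(typ, item)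
        (first_rep, st.2.insert p.1 (first_rep.getD p.2 p.1))) -- rst[item] = rep
      (PySem.Dict.empty, PySem.Dict.empty)
  st.2.items

-- ===== PRECONDITION & SPEC =====
def Spec_strategy_type (obj_type_map : List (String × String)) (out : List (String × String)) : Prop := out = strategy_type_alt obj_type_map
instance (obj_type_map : List (String × String)) (out : List (String × String)) : Decidable (Spec_strategy_type obj_type_map out) := by unfold Spec_strategy_type; infer_instance

-- ===== CLAIM (what is proved, stated in full; the proofs are below) =====
def Claim_equal_strategy_type : Prop := ∀ (obj_type_map : List (String × String)), Dom_strategy_type obj_type_map → Spec_strategy_type obj_type_map (strategy_type obj_type_map)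

-- ===== LEMMAS AND PROOFS =====

-- first object of the given type in m ("" if none; never used when the type occurs)
def pvFirstOf (m : List (String × String)) (t : String) : String :=
  ((m.filter (fun p => p.2 == t)).map (fun p => p.1)).headD ""

-- A's grouping fold, characterised by lookup
theorem pv_table_getD (l : List (String × String)) (d : PySem.Dict String (List String)) (t : String) :
    (l.foldl
      (fun d p =>
        if d.contains p.2 then d.modify p.2 [] (· ++ [p.1])
        else d.insert p.2 [p.1]) d).getD t []
    = d.getD t [] ++ (l.filter (fun p => p.2 == t)).map (fun p => p.1) := by
  induction l generalizing d with
  | nil => simp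
  | cons p l ih =>
    simp only [List.foldl_cons, List.filter_cons]
    by_cases hc : d.contains p.2
    · rw [if_pos hc, ih, PySem.Dict.getD_modify]
      by_cases ht : p.2 == t
      · simp [eq_of_beq ht]
      · have : ¬ t = p.2 := fun h => ht (by simp [h])
        simp [ht, this]
    · rw [if_neg hc, ih, PySem.Dict.getD_insert]
      by_cases ht : p.2 == t
      · have h0 : d.getD t [] = [] := by
          rw [eq_of_beq ht] at hc
          exact PySem.Dict.getD_of_not_contains _ _ (by simpa using hc)
        simp [eq_of_beq ht, h0]
      · have : ¬ t = p.2 := fun h => ht (by simp [h])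
        simp [ht, this]

theorem pv_headD_mid (a b : List String) (x : String) :
    ((a ++ x :: b).headD "") = (a.head?).getD x := by
  cases a <;> simp

theorem pv_head?_snoc (a : List String) (x : String) :
    (a ++ [x]).head? = some ((a.head?).getD x) := by
  cases a <;> simp

-- the main loop equivalence: A's second pass (with the final table already characterised as
-- pvFirstOf of the WHOLE list) equals B's single pass, given B's first_rep invariant on the prefix
theorem pv_loop_eq (m : List (String × String)) :
    ∀ (suf pre : List (String × String)) (first : PySem.Dict String String)
      (r : PySem.Dict String String),
      m = pre ++ suf →
      (∀ t, first.get? t = ((pre.filter (fun p => p.2 == t)).map (fun p => p.1)).head?) →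
      suf.foldl (fun d p => d.insert p.1 (pvFirstOf m p.2)) r
      = (suf.foldl
          (fun (st : PySem.Dict String String × PySem.Dict String String) p =>
            let first_rep := st.1.setdefault p.2 p.1
            (first_rep, st.2.insert p.1 (first_rep.getD p.2 p.1)))
          (first, r)).2 := by
  intro suf
  induction suf with
  | nil => intro pre first r _ _; rfl
  | cons p suf ih =>
    intro pre first r hm hfirst
    simp only [List.foldl_cons]
    have hval : (first.setdefault p.2 p.1).getD p.2 p.1 = pvFirstOf m p.2 := by
      rw [PySem.Dict.getD_eq_get?_getD, PySem.Dict.get?_setdefault_self, hfirst]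
      simp only [pvFirstOf, hm, List.filter_append, List.map_append, List.filter_cons]
      simp only [BEq.rfl, if_pos, List.map_cons]
      rw [pv_headD_mid]
      rfl
    rw [hval]
    refine ih (pre ++ [p]) (first.setdefault p.2 p.1) _ (by simp [hm]) ?_
    intro t
    by_cases ht : t = p.2
    · subst ht
      rw [PySem.Dict.get?_setdefault_self, hfirst]
      simp only [List.filter_append, List.map_append, List.filter_cons, BEq.rfl, if_pos,
        List.filter_nil, List.map_cons, List.map_nil]
      rw [pv_head?_snoc]
    · rw [PySem.Dict.get?_setdefault_of_ne _ _ ht, hfirst]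
      have : (p.2 == t) = false := by simp [Ne.symm ht]
      simp [List.filter_append, this]

-- ===== VERDICT (by name: the statement is the Claim_ definition above) =====
theorem strategy_type_spec : Claim_equal_strategy_type := by
  intro m _
  unfold Spec_strategy_type strategy_type strategy_type_alt
  have htab : ∀ t,
      ((m.foldl
        (fun d p =>
          if d.contains p.2 then d.modify p.2 [] (· ++ [p.1])
          else d.insert p.2 [p.1]) PySem.Dict.empty).getD t []).headD ""
      = pvFirstOf m t := by
    intro t; rw [pv_table_getD]; simp [pvFirstOf]
  have hfun :
      (fun (r : PySem.Dict String String) (p : String × String) =>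
        r.insert p.1 (((m.foldl
          (fun d p =>
            if d.contains p.2 then d.modify p.2 [] (· ++ [p.1])
            else d.insert p.2 [p.1]) PySem.Dict.empty).getD p.2 []).headD ""))
      = fun r p => r.insert p.1 (pvFirstOf m p.2) := by
    funext r p; rw [htab]
  simp only [hfun]
  rw [pv_loop_eq m m [] PySem.Dict.empty PySem.Dict.empty (by simp) (by simp)]
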